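-- pv_equiv track=rewrite | github.com/RetryYN/ai-dev-kit-vscode | cli/lib/migrate.py | _collect_block_scalar
-- ===== SOURCE A (Python) =====
-- def _collect_block_scalar(lines: list[str], start: int, base_indent: int) -> tuple[str, int]:
--     out: list[str] = []
--     i = start
--     min_indent: int | None = None
--
--     while i < len(lines):
--         raw = lines[i]
--         if not raw.strip():
--             out.append("")
--             i += 1
--             continue
--         indent = len(raw) - len(raw.lstrip(" "))
--         if indent <= base_indent:
--             break
--         if min_indent is None or indent < min_indent:
--             min_indent = indent
--         out.append(raw)
--         i += 1
--
--     if min_indent is None: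
--         return "", i
--
--     trimmed = [ln[min_indent:] if ln else "" for ln in out]
--     return "\n".join(trimmed).rstrip("\n") + "\n", i
-- ===== SOURCE B (Python) =====
-- # Different decomposition: iterate over the sliced tail (no index arithmetic),
-- # derive the stop index from the block length, and find the dedent width as the
-- # longest common all-space column prefix of the non-blank lines (column scan)
-- # instead of tracking a per-line minimum.  Negative start is outside the claim.
-- def _collect_block_scalar(lines: list[str], start: int, base_indent: int) -> tuple[str, int]:
--     block: list[str] = []
--     for raw in lines[start:]:
--         if not raw.strip():
--             block.append("")
--         elif len(raw) - len(raw.lstrip(" ")) > base_indent: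
--             block.append(raw)
--         else:
--             break
--     stop = start + len(block)
--
--     nonblank = [ln for ln in block if ln]
--     if not nonblank:
--         return "", stop
--
--     k = 0
--     while all(k < len(ln) and ln[k] == " " for ln in nonblank):
--         k += 1
--     return "\n".join(ln[k:] for ln in block).rstrip("\n") + "\n", stop
-- ===== Notes on version B (the rewrite author's own statement) =====
-- stated objective: alternative
-- what changed: A's index-driven while loop with inline min-indent tracking is replaced by iteration over the sliced tail (stop index derived arithmetically from the block length) plus a column-wise scan that finds the dedent width as the longest common all-space prefix of the non-blank lines instead of a per-line minimum.
-- outside the precondition, e.g. on _collect_block_scalar(['  a'], -1, 0): A returns ('a\na\n', 1), B returns ('a\n', 0); on _collect_block_scalar(['a'], -5, 0): A raises IndexError, B returns ('', -5)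
import Mathlib
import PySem

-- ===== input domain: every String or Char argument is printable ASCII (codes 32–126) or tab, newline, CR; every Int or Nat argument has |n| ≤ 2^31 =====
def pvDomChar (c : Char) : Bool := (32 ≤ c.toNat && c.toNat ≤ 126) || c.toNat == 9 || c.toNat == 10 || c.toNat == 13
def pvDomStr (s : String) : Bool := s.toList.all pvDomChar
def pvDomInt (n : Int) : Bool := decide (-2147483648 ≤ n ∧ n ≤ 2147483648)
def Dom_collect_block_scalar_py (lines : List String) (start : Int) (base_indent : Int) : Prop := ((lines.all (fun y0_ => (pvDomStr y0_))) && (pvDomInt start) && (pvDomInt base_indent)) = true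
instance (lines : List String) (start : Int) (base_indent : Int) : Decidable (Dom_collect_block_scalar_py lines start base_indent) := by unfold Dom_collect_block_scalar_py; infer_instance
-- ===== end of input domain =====

-- B iterates over the sliced tail and finds the dedent width as the longest common
-- all-space column prefix of the non-blank lines, instead of A's index loop with
-- inline min tracking; same result on Pre_, no speed claim.

-- ===== PORT A =====
-- not raw.strip()  (exact: Chars.strip is Python str.strip() on the ASCII domain)
def aBlank (s : String) : Bool := PySem.Chars.strip s.toList == []
-- len(raw) - len(raw.lstrip(" "))  (exact: lstrip(" ") removes exactly the leading spaces)
def aIndent (s : String) : Int := (s.toList.length : Int) - ((s.toList.dropWhile (· == ' ')).length : Int)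
-- ln[m:]
def pySliceFrom (s : String) (m : Int) : String := String.ofList (PySem.List.slice s.toList (some m) none)
-- s.rstrip("\n")  (exact: drops exactly the trailing newlines)
def pyRstripNl (s : String) : String := String.ofList ((s.toList.reverse.dropWhile (· == '\n')).reverse)

-- the while-loop: fuel = number of remaining indices (i increments by 1 each iteration)
def aLoop (lines : List String) (base_indent : Int) (fuel : Nat) (i : Int)
    (out : List String) (minIndent : Option Int) : List String × Option Int × Int :=
  match fuel with
  | 0 => (out, minIndent, i)
  | fuel + 1 =>
    let raw := PySem.List.pyGetD lines i ""
    if aBlank raw then aLoop lines base_indent fuel (i + 1) (out ++ [""]) minIndent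
    else
      let indent := aIndent raw
      if indent ≤ base_indent then (out, minIndent, i)
      else
        let minIndent' := match minIndent with
          | none => some indent
          | some m => if indent < m then some indent else some m
        aLoop lines base_indent fuel (i + 1) (out ++ [raw]) minIndent'

def collect_block_scalar_py (lines : List String) (start : Int) (base_indent : Int) : String × Int :=
  let r := aLoop lines base_indent ((lines.length - start).toNat) start [] none
  match r.2.1 with
  | none => ("", r.2.2)
  | some m =>
    let trimmed := r.1.map (fun ln => if ln == "" then "" else pySliceFrom ln m)
    (pyRstripNl (PySem.Str.join "\n" trimmed) ++ "\n", r.2.2)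

-- ===== PORT B =====
-- not raw.strip()
def bBlank (s : String) : Bool := PySem.Str.strip s == ""
-- len(raw) - len(raw.lstrip(" "))  (exact: equals the length of the leading run of spaces)
def bIndent (s : String) : Int := ((s.toList.takeWhile (· == ' ')).length : Int)

-- phase 1: the for-loop over lines[start:] with break, as structural recursion on the tail
def bTake (base_indent : Int) : List String → List String
  | [] => []
  | raw :: rest =>
    if bBlank raw then "" :: bTake base_indent rest
    else if bIndent raw > base_indent then raw :: bTake base_indent rest
    else []

-- phase 2: the column scan 'while all(k < len(ln) and ln[k] == " " for ln in nonblank): k += 1';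
-- fuel = len(first nonblank line) + 1 bounds it (the condition fails once k reaches that length)
def bColScan (nb : List (List Char)) (fuel : Nat) (k : Nat) : Nat :=
  match fuel with
  | 0 => k
  | fuel + 1 =>
    if nb.all (fun ln => decide (k < ln.length) && (ln[k]? == some ' ')) then
      bColScan nb fuel (k + 1)
    else k

def collect_block_scalar_py_alt (lines : List String) (start : Int) (base_indent : Int) : String × Int :=
  let block := bTake base_indent (PySem.List.slice lines (some start) none)
  let stop := start + (block.length : Int)
  let nonblank := block.filter (fun ln => ln ≠ "")
  match nonblank with
  | [] => ("", stop)
  | h :: _ =>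
    let k := bColScan (nonblank.map String.toList) (h.toList.length + 1) 0
    (pyRstripNl (PySem.Str.join "\n" (block.map (fun ln => pySliceFrom ln (k : Int)))) ++ "\n", stop)

-- ===== PRECONDITION & SPEC =====
-- Pre_ excludes negative start: for start < -len(lines) A raises IndexError, and for
-- -len ≤ start < 0 A's negative-index wraparound re-reads lines from the front — an
-- unspecified corner where B's slice reading is as defensible as A's.
def Pre_collect_block_scalar_py (lines : List String) (start : Int) (base_indent : Int) : Prop :=
  0 ≤ start
instance (lines : List String) (start : Int) (base_indent : Int) : Decidable (Pre_collect_block_scalar_py lines start base_indent) := by unfold Pre_collect_block_scalar_py; infer_instance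

def pvWitness_collect_block_scalar_py : List String × Int × Int := (["  a", " b"], 0, 0)

def Spec_collect_block_scalar_py (lines : List String) (start : Int) (base_indent : Int) (out : String × Int) : Prop := out = collect_block_scalar_py_alt lines start base_indent
instance (lines : List String) (start : Int) (base_indent : Int) (out : String × Int) : Decidable (Spec_collect_block_scalar_py lines start base_indent out) := by unfold Spec_collect_block_scalar_py; infer_instance

-- ===== CLAIM (what is proved, stated in full; the proofs are below) =====
def Claim_equal_collect_block_scalar_py : Prop := ∀ (lines : List String) (start : Int) (base_indent : Int), Dom_collect_block_scalar_py lines start base_indent → Pre_collect_block_scalar_py lines start base_indent → Spec_collect_block_scalar_py lines start base_indent (collect_block_scalar_py lines start base_indent)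

-- ===== LEMMAS AND PROOFS =====

-- leading-space count as a Nat (bIndent is its cast)
def cN (s : String) : Nat := (s.toList.takeWhile (· == ' ')).length

theorem blank_eq (s : String) : bBlank s = aBlank s := by
  simp only [aBlank, bBlank]
  rw [Bool.eq_iff_iff, beq_iff_eq, beq_iff_eq, ← String.toList_inj, PySem.Str.toList_strip]
  simp

theorem indent_eq (s : String) : bIndent s = aIndent s := by
  have h := List.takeWhile_append_dropWhile (p := (· == ' ')) (l := s.toList)
  have h2 := congrArg List.length h
  simp only [List.length_append] at h2
  unfold aIndent bIndent
  omega

theorem aIndent_eq_cN (s : String) : aIndent s = (cN s : Int) := by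
  rw [← indent_eq]; rfl

-- the while-loop, unfolded against bTake over the dropped tail
theorem aLoop_bTake (lines : List String) (bi : Int) :
    ∀ (fuel : Nat) (i : Int) (out : List String) (mi : Option Int), 0 ≤ i →
    fuel = lines.length - i.toNat →
    aLoop lines bi fuel i out mi
      = (out ++ bTake bi (lines.drop i.toNat),
         ((bTake bi (lines.drop i.toNat)).filter (fun ln => ln ≠ "")).map aIndent
           |>.foldl (fun a x => match a with
             | none => some x
             | some m => if x < m then some x else some m) mi,
         i + ((bTake bi (lines.drop i.toNat)).length : Int)) := by
  intro fuel
  induction fuel with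
  | zero =>
    intro i out mi hi hf
    have hd : lines.drop i.toNat = [] := List.drop_eq_nil_of_le (by omega)
    simp [aLoop, hd, bTake]
  | succ fuel ih =>
    intro i out mi hi hf
    obtain ⟨n, rfl⟩ := Int.eq_ofNat_of_zero_le hi
    simp only [Int.toNat_natCast] at hf ⊢
    have hlt : n < lines.length := by omega
    have hget : PySem.List.pyGetD lines (n : Int) "" = lines[n] := by
      rw [PySem.List.pyGetD_natCast]
      exact List.getD_eq_getElem lines "" hlt
    have hd : lines.drop n = lines[n] :: lines.drop (n + 1) :=
      List.drop_eq_getElem_cons hlt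
    have hstep : ((n : Int) + 1) = ((n + 1 : Nat) : Int) := by omega
    simp only [aLoop, hget, hd, bTake, ← blank_eq, ← indent_eq]
    by_cases hb : bBlank lines[n] = true
    · rw [if_pos hb, if_pos hb, hstep,
        ih ((n + 1 : Nat) : Int) (out ++ [""]) mi (by positivity) (by simp; omega)]
      simp only [Int.toNat_natCast, List.filter_cons]
      simp
      omega
    · rw [if_neg hb, if_neg hb]
      by_cases hind : bIndent lines[n] ≤ bi
      · rw [if_pos hind, if_neg (by omega : ¬ bIndent lines[n] > bi)]
        simp
      · rw [if_neg hind, if_pos (by omega : bIndent lines[n] > bi), hstep,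
          ih ((n + 1 : Nat) : Int) (out ++ [lines[n]]) _ (by positivity) (by simp; omega)]
        have hne : lines[n] ≠ "" := by
          intro he; rw [he] at hb; exact hb rfl
        rw [indent_eq]
        simp [hne]
        omega

-- fold of A's inline min update over casts = Nat foldl-min, cast
theorem minFold_cast (t : List String) : ∀ (a : Nat),
    (t.map aIndent).foldl (fun acc x => match acc with
        | none => some x
        | some m => if x < m then some x else some m) (some (a : Int))
      = some ((t.foldl (fun acc s => min acc (cN s)) a : Nat) : Int) := by
  induction t with
  | nil => intro a; simp
  | cons s t ih =>
    intro a
    simp only [List.map_cons, List.foldl_cons, aIndent_eq_cN]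
    have h : (if ((cN s : Nat) : Int) < ((a : Nat) : Int) then some ((cN s : Nat) : Int) else some ((a : Nat) : Int))
        = some ((min a (cN s) : Nat) : Int) := by
      split_ifs with h1
      · rw [Nat.min_def, if_neg (by omega : ¬ a ≤ cN s)]
      · rw [Nat.min_def, if_pos (by omega : a ≤ cN s)]
    rw [h, ih]

theorem foldlMin_lt (t : List String) : ∀ (a k : Nat),
    (k < t.foldl (fun acc s => min acc (cN s)) a ↔ k < a ∧ ∀ s ∈ t, k < cN s) := by
  induction t with
  | nil => intro a k; simp
  | cons s t ih =>
    intro a k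
    simp only [List.foldl_cons, ih, Nat.lt_min, List.mem_cons]
    constructor
    · rintro ⟨⟨h1, h2⟩, h3⟩
      refine ⟨h1, fun x hx => ?_⟩
      rcases hx with rfl | hx
      · exact h2
      · exact h3 x hx
    · rintro ⟨h1, h2⟩
      exact ⟨⟨h1, h2 s (Or.inl rfl)⟩, fun x hx => h2 x (Or.inr hx)⟩

theorem foldlMin_le_init (t : List String) : ∀ (a : Nat),
    t.foldl (fun acc s => min acc (cN s)) a ≤ a := by
  induction t with
  | nil => intro a; simp
  | cons s t ih =>
    intro a
    exact le_trans (ih _) (Nat.min_le_left _ _)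

theorem foldlMin_le_mem (t : List String) : ∀ (a : Nat) (s : String), s ∈ t →
    t.foldl (fun acc s => min acc (cN s)) a ≤ cN s := by
  induction t with
  | nil => intro a s h; cases h
  | cons x t ih =>
    intro a s h
    rcases List.mem_cons.mp h with rfl | h
    · exact le_trans (foldlMin_le_init t _) (Nat.min_le_right _ _)
    · exact ih _ s h

-- per-line column condition, below or at the leading-space run
theorem colCond (l : List Char) : ∀ (k : Nat), k ≤ (l.takeWhile (· == ' ')).length →
    ((decide (k < l.length) && (l[k]? == some ' ')) = decide (k < (l.takeWhile (· == ' ')).length)) := by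
  induction l with
  | nil => intro k hk; simp
  | cons c l ih =>
    intro k hk
    by_cases hc : c = ' '
    · subst hc
      simp only [List.takeWhile_cons, beq_self_eq_true, if_pos, List.length_cons] at hk ⊢
      match k with
      | 0 => simp
      | k + 1 =>
        simp only [Nat.add_lt_add_iff_right, List.getElem?_cons_succ]
        exact ih k (by omega)
    · have hcb : (c == ' ') = false := by simp [hc]
      simp only [List.takeWhile_cons, hcb, Bool.false_eq_true, if_false, List.length_nil,
        Nat.le_zero] at hk
      subst hk
      simp [hc]

-- the column scan computes the foldl-min of the leading-space runs
theorem colScan_eq (h : String) (t : List String) :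
    ∀ (fuel k : Nat),
    k ≤ (t.foldl (fun acc s => min acc (cN s)) (cN h)) →
    (t.foldl (fun acc s => min acc (cN s)) (cN h)) - k < fuel →
    bColScan ((h :: t).map String.toList) fuel k = t.foldl (fun acc s => min acc (cN s)) (cN h) := by
  intro fuel
  induction fuel with
  | zero => intro k hk hf; omega
  | succ fuel ih =>
    intro k hk hf
    have hcond : (((h :: t).map String.toList).all
        (fun ln => decide (k < ln.length) && (ln[k]? == some ' ')))
        = decide (k < t.foldl (fun acc s => min acc (cN s)) (cN h)) := by
      rw [List.all_map]
      have hall : ∀ s ∈ h :: t,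
          ((decide (k < s.toList.length) && (s.toList[k]? == some ' '))
            = decide (k < cN s)) := by
        intro s hs
        apply colCond
        have hle : t.foldl (fun acc s => min acc (cN s)) (cN h) ≤ cN s := by
          rcases List.mem_cons.mp hs with rfl | hs
          · exact foldlMin_le_init t _
          · exact foldlMin_le_mem t _ s hs
        exact le_trans hk hle
      by_cases hklt : k < t.foldl (fun acc s => min acc (cN s)) (cN h)
      · rw [decide_eq_true hklt, List.all_eq_true]
        intro s hs
        rw [Function.comp_apply, hall s hs, decide_eq_true_iff]
        have := (foldlMin_lt t (cN h) k).mp hklt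
        rcases List.mem_cons.mp hs with rfl | hs
        · exact this.1
        · exact this.2 s hs
      · rw [decide_eq_false hklt, List.all_eq_false]
        have := hklt
        rw [foldlMin_lt] at this
        push Not at this
        by_cases hkh : k < cN h
        · obtain ⟨s, hs, hns⟩ := this hkh
          refine ⟨s, List.mem_cons_of_mem h hs, ?_⟩
          rw [Function.comp_apply, hall s (List.mem_cons_of_mem h hs)]
          simpa using hns
        · refine ⟨h, List.mem_cons_self, ?_⟩
          rw [Function.comp_apply, hall h List.mem_cons_self]
          simpa using hkh
    rw [bColScan, hcond]
    by_cases hklt : k < t.foldl (fun acc s => min acc (cN s)) (cN h)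
    · rw [if_pos (by simpa using hklt)]
      exact ih (k + 1) (by omega) (by omega)
    · rw [if_neg (by simpa using hklt)]
      omega

theorem cN_le_len (s : String) : cN s ≤ s.toList.length :=
  (List.takeWhile_sublist _).length_le

theorem pySliceFrom_empty (m : Int) : pySliceFrom "" m = "" := by
  unfold pySliceFrom
  rw [show ("" : String).toList = [] from rfl, PySem.List.slice_some_none]
  simp

theorem collect_eq (lines : List String) (start bi : Int) (hs : 0 ≤ start) :
    collect_block_scalar_py lines start bi = collect_block_scalar_py_alt lines start bi := by
  unfold collect_block_scalar_py collect_block_scalar_py_alt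
  rw [PySem.List.slice_from lines hs]
  rw [aLoop_bTake lines bi ((lines.length - start).toNat) start [] none hs (by omega)]
  simp only [List.nil_append]
  generalize hB : bTake bi (lines.drop start.toNat) = block
  cases hnb : block.filter (fun ln => ln ≠ "") with
  | nil => simp
  | cons h t =>
    have hscan : bColScan ((h :: t).map String.toList) (h.toList.length + 1) 0
        = t.foldl (fun acc s => min acc (cN s)) (cN h) := by
      apply colScan_eq h t (h.toList.length + 1) 0 (by omega)
      have h1 : t.foldl (fun acc s => min acc (cN s)) (cN h) ≤ cN h := foldlMin_le_init t _
      have h2 := cN_le_len h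
      omega
    simp only [List.map_cons] at hscan
    simp only [List.map_cons, List.foldl_cons, aIndent_eq_cN]
    rw [minFold_cast t (cN h), hscan]
    have htrim : block.map (fun ln => if ln = "" then "" else
          pySliceFrom ln ((t.foldl (fun acc s => min acc (cN s)) (cN h) : Nat) : Int))
        = block.map (fun ln =>
          pySliceFrom ln ((t.foldl (fun acc s => min acc (cN s)) (cN h) : Nat) : Int)) := by
      apply List.map_congr_left
      intro ln _
      by_cases he : ln = ""
      · subst he; simp [pySliceFrom_empty]
      · simp [he]
    simp [htrim]

-- ===== VERDICT (by name: the statement is the Claim_ definition above) =====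
theorem collect_block_scalar_py_spec : Claim_equal_collect_block_scalar_py := by
  intro lines start bi _ hpre
  exact collect_eq lines start bi hpre
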